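-- pv_equiv track=rewrite | github.com/kshitij1489/dn_analytics | src/core/utils/formatting.py | format_indian_currency
-- ===== SOURCE A (Python) =====
-- def format_indian_currency(number):
--     """Format number with Indian nomenclature (Lakhs, Crores) without decimals"""
--     try:
--         if number is None: return "0"
--         s = str(int(float(number)))
--         if len(s) <= 3: return s
--         last_three = s[-3:]
--         others = s[:-3]
--         others_reversed = others[::-1]
--         pairs = [others_reversed[i:i+2] for i in range(0, len(others_reversed), 2)]
--         formatted_others = ",".join(pairs)[::-1]
--         return f"{formatted_others},{last_three}"
--     except:
--         return str(number)
-- ===== SOURCE B (Python) =====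
-- def format_indian_currency(number):
--     """Format number with Indian nomenclature (Lakhs, Crores) without decimals"""
--     try:
--         if number is None: return "0"
--         s = str(int(float(number)))
--         if len(s) <= 3: return s
--         return _group(s[:-3]) + "," + s[-3:]
--     except:
--         return str(number)
--
--
-- def _group(t):
--     """Group the head part into pairs from the right, recursively."""
--     if len(t) <= 2:
--         return t
--     return _group(t[:-2]) + "," + t[-2:]
-- ===== Notes on version B (the rewrite author's own statement) =====
-- stated objective: simpler
-- what changed: Replaces the reverse/chunk-into-pairs/join/reverse pipeline with a direct recursion on the head part that peels two digits off the right end at a time (_group(t) = _group(t[:-2]) + ',' + t[-2:]), eliminating both reversals and the range-based chunking.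
import Mathlib
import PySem

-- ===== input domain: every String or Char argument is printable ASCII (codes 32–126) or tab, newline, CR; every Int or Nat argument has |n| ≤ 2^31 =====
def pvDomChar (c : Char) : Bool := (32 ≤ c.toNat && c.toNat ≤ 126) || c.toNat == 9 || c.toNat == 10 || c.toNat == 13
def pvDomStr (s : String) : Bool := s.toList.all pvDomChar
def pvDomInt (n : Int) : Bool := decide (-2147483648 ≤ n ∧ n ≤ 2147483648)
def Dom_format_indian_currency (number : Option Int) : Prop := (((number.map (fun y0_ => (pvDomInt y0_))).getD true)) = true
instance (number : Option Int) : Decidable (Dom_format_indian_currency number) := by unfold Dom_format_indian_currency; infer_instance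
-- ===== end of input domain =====

-- B replaces A's reverse/chunk-into-pairs/join/reverse grouping by a direct recursion that peels
-- two digits off the right end of the head part at a time (objective: simpler). Under the type
-- convention `number` is None or an int, and on ints `int(float(number))` is exact for |n| ≤ 2^31,
-- so it is ported as the identity and the `except` branch is unreachable.

-- ===== PORT A =====
def format_indian_currency (number : Option Int) : String :=
  match number with
  | none => "0"
  | some n =>
    let s : List Char := PySem.Int.toChars n          -- s = str(int(float(number)))
    if PySem.List.len s ≤ 3 then String.ofList s
    else
      let last_three := PySem.List.slice s (some (-3)) none
      let others := PySem.List.slice s none (some (-3))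
      let others_reversed := (PySem.List.slice? others none none (-1)).getD []   -- others[::-1]
      let pairs := (PySem.List.pyRange 0 (PySem.List.len others_reversed) 2).map
        (fun i => PySem.List.slice others_reversed (some i) (some (i + 2)))
      let formatted_others := (PySem.List.slice? (PySem.Chars.join [','] pairs) none none (-1)).getD []
      String.ofList (formatted_others ++ [','] ++ last_three)

-- ===== PORT B =====
-- _group(t): if len(t) <= 2: return t ; return _group(t[:-2]) + "," + t[-2:]
def pvGroup (t : List Char) : List Char :=
  if PySem.List.len t ≤ 2 then t
  else pvGroup (PySem.List.slice t none (some (-2))) ++ [','] ++ PySem.List.slice t (some (-2)) none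
termination_by t.length
decreasing_by
  rw [PySem.List.slice_to_neg_ofNat t 2 (by norm_num)]
  simp only [PySem.List.len_eq, not_le] at *
  simp only [List.length_take]
  omega

def format_indian_currency_alt (number : Option Int) : String :=
  match number with
  | none => "0"
  | some n =>
    let s : List Char := PySem.Int.toChars n
    if PySem.List.len s ≤ 3 then String.ofList s
    else String.ofList (pvGroup (PySem.List.slice s none (some (-3))) ++ [','] ++
      PySem.List.slice s (some (-3)) none)

-- ===== PRECONDITION & SPEC =====
def Spec_format_indian_currency (number : Option Int) (out : String) : Prop := out = format_indian_currency_alt number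
instance (number : Option Int) (out : String) : Decidable (Spec_format_indian_currency number out) := by unfold Spec_format_indian_currency; infer_instance

-- ===== CLAIM (what is proved, stated in full; the proofs are below) =====
def Claim_equal_format_indian_currency : Prop := ∀ (number : Option Int), Dom_format_indian_currency number → Spec_format_indian_currency number (format_indian_currency number)

-- ===== LEMMAS AND PROOFS =====

-- the chunking [others_reversed[i:i+2] for i in range(0, len, 2)] as a structural recursion
def chunk2 : List Char → List (List Char)
  | [] => []
  | [a] => [[a]]
  | a :: b :: rest => [a, b] :: chunk2 rest

theorem chunk2_ne_nil (r : List Char) (h : r ≠ []) : chunk2 r ≠ [] := by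
  cases r with
  | nil => exact absurd rfl h
  | cons a t => cases t <;> simp [chunk2]

theorem chunk2_range (r : List Char) :
    (List.range ((r.length + 1) / 2)).map (fun k => (r.drop (2 * k)).take 2) = chunk2 r := by
  induction r using chunk2.induct with
  | case1 => simp [chunk2]
  | case2 a => simp [chunk2]
  | case3 a b rest ih =>
      have hcnt : ((a :: b :: rest).length + 1) / 2 = (rest.length + 1) / 2 + 1 := by
        simp; omega
      rw [hcnt, List.range_succ_eq_map, List.map_cons, List.map_map]
      simp only [chunk2, List.cons.injEq]
      refine ⟨by simp, ?_⟩
      rw [← ih]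
      apply List.map_congr_left
      intro k _
      have h2 : 2 * (k + 1) = 2 * k + 1 + 1 := by ring
      simp [Function.comp, h2, List.drop_succ_cons]

theorem pairs_eq_chunk2 (r : List Char) :
    (PySem.List.pyRange 0 (PySem.List.len r) 2).map
      (fun i => PySem.List.slice r (some i) (some (i + 2))) = chunk2 r := by
  rw [← chunk2_range r]
  rw [PySem.List.pyRange_of_pos 0 _ (s := 2) (by norm_num)]
  rcases Nat.eq_zero_or_pos r.length with h0 | hpos
  · simp [PySem.List.len_eq, h0]
  · have hif : (0 : Int) < PySem.List.len r := by simp [PySem.List.len_eq]; omega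
    rw [if_pos hif]
    have hcnt : ((PySem.List.len r - 0 + 2 - 1) / 2).toNat = (r.length + 1) / 2 := by
      simp [PySem.List.len_eq]; omega
    rw [hcnt, List.map_map]
    apply List.map_congr_left
    intro k _
    show PySem.List.slice r (some (0 + 2 * (k : Int))) (some (0 + 2 * (k : Int) + 2))
        = (r.drop (2 * k)).take 2
    rw [PySem.List.slice_toNat r (by positivity) (by positivity)]
    have t1 : ((0 : Int) + 2 * (k : Int)).toNat = 2 * k := by omega
    have t2 : ((0 : Int) + 2 * (k : Int) + 2).toNat = 2 * k + 2 := by omega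
    rw [t1, t2]
    norm_num

-- A's "reverse, chunk into pairs, join, reverse" equals B's right-peeling recursion
theorem main_group (r : List Char) :
    (PySem.Chars.join [','] (chunk2 r)).reverse = pvGroup r.reverse := by
  induction r using chunk2.induct with
  | case1 => simp [chunk2, PySem.Chars.join_nil, pvGroup]
  | case2 a => simp [chunk2, PySem.Chars.join_singleton, pvGroup, PySem.List.len_eq]
  | case3 a b rest ih =>
      cases rest with
      | nil =>
          simp only [chunk2, PySem.Chars.join_singleton]
          rw [pvGroup]
          simp [PySem.List.len_eq]
      | cons c rest' =>
          have hne : (c :: rest') ≠ ([] : List Char) := by simp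
          obtain ⟨q, L', hq⟩ : ∃ q L', chunk2 (c :: rest') = q :: L' := by
            cases hc : chunk2 (c :: rest') with
            | nil => exact absurd hc (chunk2_ne_nil _ hne)
            | cons q L' => exact ⟨q, L', rfl⟩
          rw [show chunk2 (a :: b :: c :: rest') = [a, b] :: chunk2 (c :: rest') from rfl, hq,
            PySem.Chars.join_cons_cons, ← hq]
          have hrev : (a :: b :: c :: rest').reverse = (c :: rest').reverse ++ [b, a] := by simp
          rw [hrev]
          set u : List Char := (c :: rest').reverse ++ [b, a] with hu
          have hulen : u.length = rest'.length + 3 := by simp [hu]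
          rw [pvGroup, if_neg (by simp [PySem.List.len_eq, hulen]; omega)]
          rw [PySem.List.slice_to_neg_ofNat u 2 (by norm_num),
            PySem.List.slice_from_neg_ofNat u 2 (by norm_num)]
          have hn : u.length - 2 = ((c :: rest').reverse).length := by simp [hulen]
          have htake : u.take (u.length - 2) = (c :: rest').reverse := by
            rw [hn, hu]; exact List.take_left' rfl
          have hdrop : u.drop (u.length - 2) = [b, a] := by
            rw [hn, hu]; exact List.drop_left' rfl
          rw [htake, hdrop, ← ih]
          simp

-- ===== VERDICT (by name: the statement is the Claim_ definition above) =====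
theorem format_indian_currency_spec : Claim_equal_format_indian_currency := by
  intro number _
  unfold Spec_format_indian_currency
  cases number with
  | none => rfl
  | some n =>
      simp only [format_indian_currency, format_indian_currency_alt]
      by_cases hlen : PySem.List.len (PySem.Int.toChars n) ≤ 3
      · rw [if_pos hlen, if_pos hlen]
      · rw [if_neg hlen, if_neg hlen]
        set t := PySem.List.slice (PySem.Int.toChars n) none (some (-3)) with ht
        rw [PySem.List.slice?_none_none_neg_one, Option.getD_some, pairs_eq_chunk2,
          PySem.List.slice?_none_none_neg_one, Option.getD_some]
        have := main_group t.reverse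
        rw [List.reverse_reverse] at this
        rw [this]
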